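-- pv_equiv track=rewrite | github.com/rohteemie/Scanlytic-Forensic-AI | scanlytic/features/extractor.py | _detect_suspicious_patterns
-- ===== SOURCE A (Python) =====
-- def _detect_suspicious_patterns(strings: list) -> list:
--     """
--     Detect suspicious string patterns.
--
--     Args:
--         strings: List of extracted strings
--
--     Returns:
--         list: List of suspicious strings
--     """
--     suspicious = []
--     patterns = [
--         'cmd.exe', 'powershell', 'sh', 'bash',
--         'http://', 'https://',
--         'registry', 'regedit',
--         'download', 'upload',
--         'keylog', 'password', 'credential',
--         'encrypt', 'decrypt',
--         'admin', 'root',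
--         'backdoor', 'trojan', 'virus'
--     ]
--
--     for s in strings:
--         s_lower = s.lower()
--         for pattern in patterns:
--             if pattern in s_lower:
--                 suspicious.append(s)
--                 break
--
--     return suspicious[:20]  # Limit to 20 suspicious strings
-- ===== SOURCE B (Python) =====
-- _PATTERNS = [
--     'cmd.exe', 'powershell', 'sh', 'bash',
--     'http://', 'https://',
--     'registry', 'regedit',
--     'download', 'upload',
--     'keylog', 'password', 'credential',
--     'encrypt', 'decrypt',
--     'admin', 'root',
--     'backdoor', 'trojan', 'virus'
-- ]
--
--
-- def _matches_at(t, i):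
--     # does any pattern start exactly at position i of t?
--     for p in _PATTERNS:
--         if t.startswith(p, i):
--             return True
--     return False
--
--
-- def _is_suspicious(s):
--     t = s.lower()
--     for i in range(len(t)):
--         if _matches_at(t, i):
--             return True
--     return False
--
--
-- def _detect_suspicious_patterns(strings: list) -> list:
--     out = []
--     for s in strings:
--         if len(out) == 20:
--             break
--         if _is_suspicious(s):
--             out.append(s)
--     return out
-- ===== Notes on version B (the rewrite author's own statement) =====
-- stated objective: alternative
-- what changed: B scans each lowered string position-first (checking whether any pattern starts at each index) instead of pattern-first substring search, and stops collecting as soon as 20 hits are found instead of building the full list and truncating.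
import Mathlib
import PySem

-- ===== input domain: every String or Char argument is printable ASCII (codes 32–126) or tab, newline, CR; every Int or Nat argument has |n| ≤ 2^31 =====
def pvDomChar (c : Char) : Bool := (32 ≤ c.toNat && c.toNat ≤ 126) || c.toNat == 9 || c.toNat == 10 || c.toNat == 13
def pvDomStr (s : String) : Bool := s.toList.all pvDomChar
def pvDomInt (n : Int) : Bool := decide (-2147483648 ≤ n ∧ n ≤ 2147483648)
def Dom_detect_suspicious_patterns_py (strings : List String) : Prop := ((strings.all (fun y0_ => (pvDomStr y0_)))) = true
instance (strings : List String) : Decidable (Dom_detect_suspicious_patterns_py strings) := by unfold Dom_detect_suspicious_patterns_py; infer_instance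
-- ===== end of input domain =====

-- B checks each lowered string position-first (does any pattern start at index i?) and stops
-- collecting at 20 hits, instead of A's pattern-first substring scan followed by truncation.
-- Objective: alternative (same cost class, genuinely different traversal).

-- ===== PORT A =====
def pvPatternsA : List String :=
  ["cmd.exe", "powershell", "sh", "bash",
   "http://", "https://",
   "registry", "regedit",
   "download", "upload",
   "keylog", "password", "credential",
   "encrypt", "decrypt",
   "admin", "root",
   "backdoor", "trojan", "virus"]

-- inner 'for pattern: if pattern in s_lower: append; break' = append once if any pattern matches
def detect_suspicious_patterns_py (strings : List String) : List String :=
  let suspicious := strings.foldl (fun acc s =>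
    let s_lower := PySem.Str.lower s
    if pvPatternsA.any (fun p => PySem.Str.isIn p s_lower) then acc ++ [s] else acc) []
  PySem.List.slice suspicious none (some 20)

-- ===== PORT B =====
def pvPatternsB : List (List Char) :=
  ["cmd.exe".toList, "powershell".toList, "sh".toList, "bash".toList,
   "http://".toList, "https://".toList,
   "registry".toList, "regedit".toList,
   "download".toList, "upload".toList,
   "keylog".toList, "password".toList, "credential".toList,
   "encrypt".toList, "decrypt".toList,
   "admin".toList, "root".toList,
   "backdoor".toList, "trojan".toList, "virus".toList]

def pvMatchesAt (t : List Char) (i : Nat) : Bool :=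
  pvPatternsB.any (fun p => PySem.Chars.startswith (t.drop i) p)

def pvIsSuspicious (s : String) : Bool :=
  let t := PySem.Chars.lower s.toList
  (List.range t.length).any (fun i => pvMatchesAt t i)

def pvCollect (acc : List String) : List String → List String
  | [] => acc
  | s :: rest =>
    if acc.length = 20 then acc
    else if pvIsSuspicious s then pvCollect (acc ++ [s]) rest
    else pvCollect acc rest

def detect_suspicious_patterns_py_alt (strings : List String) : List String :=
  pvCollect [] strings

-- ===== PRECONDITION & SPEC =====
def Spec_detect_suspicious_patterns_py (strings : List String) (out : List String) : Prop := out = detect_suspicious_patterns_py_alt strings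
instance (strings : List String) (out : List String) : Decidable (Spec_detect_suspicious_patterns_py strings out) := by unfold Spec_detect_suspicious_patterns_py; infer_instance

-- ===== CLAIM (what is proved, stated in full; the proofs are below) =====
def Claim_equal_detect_suspicious_patterns_py : Prop := ∀ (strings : List String), Dom_detect_suspicious_patterns_py strings → Spec_detect_suspicious_patterns_py strings (detect_suspicious_patterns_py strings)

-- ===== LEMMAS AND PROOFS =====

-- all patterns are nonempty, and the two literal pattern lists correspond
theorem pvPatternsB_eq : pvPatternsB = pvPatternsA.map String.toList := by decide

theorem pvPatterns_ne_nil : ∀ p ∈ pvPatternsA, p.toList ≠ [] := by decide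

-- bounded vs unbounded position: for a nonempty pattern a witness position is < length
theorem pv_bounded_drop (sub t : List Char) (h : sub ≠ []) :
    (∃ i ∈ List.range t.length, sub <+: t.drop i) ↔ (∃ j, sub <+: t.drop j) := by
  constructor
  · rintro ⟨i, _, hp⟩; exact ⟨i, hp⟩
  · rintro ⟨j, hp⟩
    by_cases hj : j < t.length
    · exact ⟨j, List.mem_range.mpr hj, hp⟩
    · exfalso
      have : t.drop j = [] := List.drop_eq_nil_of_le (le_of_not_gt hj)
      rw [this] at hp
      exact h (List.prefix_nil.mp hp)

-- per-string test equivalence: A's pattern-first test equals B's position-first test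
theorem pv_test_eq (s : String) :
    pvPatternsA.any (fun p => PySem.Str.isIn p (PySem.Str.lower s)) = pvIsSuspicious s := by
  rw [Bool.eq_iff_iff]
  unfold pvIsSuspicious pvMatchesAt
  simp only [List.any_eq_true, pvPatternsB_eq, List.mem_map]
  constructor
  · rintro ⟨p, hp, hin⟩
    rw [PySem.Str.isIn_iff_infix, PySem.Str.toList_lower] at hin
    have h1 : PySem.Chars.isIn p.toList (PySem.Chars.lower s.toList) = true :=
      (PySem.Chars.isIn_iff_infix _ _).mpr hin
    have h2 := (PySem.Chars.exists_prefix_drop_iff_isIn p.toList (PySem.Chars.lower s.toList)).mpr h1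
    obtain ⟨i, hi, hpre⟩ := (pv_bounded_drop _ _ (pvPatterns_ne_nil p hp)).mpr h2
    exact ⟨i, hi, p.toList, ⟨p, hp, rfl⟩, (PySem.Chars.startswith_iff _ _).mpr hpre⟩
  · rintro ⟨i, hi, q, ⟨p, hp, rfl⟩, hsw⟩
    refine ⟨p, hp, ?_⟩
    rw [PySem.Str.isIn_iff_infix, PySem.Str.toList_lower]
    have hpre := (PySem.Chars.startswith_iff _ _).mp hsw
    have h2 : ∃ j, p.toList <+: (PySem.Chars.lower s.toList).drop j := ⟨i, hpre⟩
    have h1 := (PySem.Chars.exists_prefix_drop_iff_isIn p.toList (PySem.Chars.lower s.toList)).mp h2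
    exact (PySem.Chars.isIn_iff_infix _ _).mp h1

-- early-stopping collection = filter then take
theorem pvCollect_eq (l : List String) : ∀ (acc : List String), acc.length ≤ 20 →
    pvCollect acc l = acc ++ (l.filter pvIsSuspicious).take (20 - acc.length) := by
  induction l with
  | nil => intro acc _; simp [pvCollect]
  | cons s rest ih =>
    intro acc hle
    by_cases h20 : acc.length = 20
    · simp [pvCollect, h20]
    · have hlt : acc.length < 20 := lt_of_le_of_ne hle h20
      by_cases hs : pvIsSuspicious s
      · rw [pvCollect, if_neg h20, if_pos hs, ih (acc ++ [s]) (by simp; omega)]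
        have h2 : (acc ++ [s]).length = acc.length + 1 := by simp
        have h1 : 20 - acc.length = (20 - (acc.length + 1)) + 1 := by omega
        rw [h2, List.filter_cons_of_pos hs, h1, List.take_succ_cons, List.append_assoc,
          List.singleton_append]
      · rw [pvCollect, if_neg h20, if_neg (by simp [hs]), ih acc hle,
          List.filter_cons_of_neg (by simp [hs])]

-- A's fold = filter (with A's test)
theorem pvFold_eq (l : List String) : ∀ (acc : List String),
    l.foldl (fun acc s =>
      if pvPatternsA.any (fun p => PySem.Str.isIn p (PySem.Str.lower s)) then acc ++ [s] else acc) acc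
    = acc ++ l.filter (fun s => pvPatternsA.any (fun p => PySem.Str.isIn p (PySem.Str.lower s))) := by
  induction l with
  | nil => intro acc; simp
  | cons s rest ih =>
    intro acc
    by_cases hs : pvPatternsA.any (fun p => PySem.Str.isIn p (PySem.Str.lower s))
    · rw [List.foldl_cons, if_pos hs, ih]
      simp only [List.filter_cons]
      rw [if_pos hs, List.append_assoc, List.singleton_append]
    · rw [List.foldl_cons, if_neg hs, ih]
      simp only [List.filter_cons]
      rw [if_neg hs]

-- ===== VERDICT (by name: the statement is the Claim_ definition above) =====
theorem detect_suspicious_patterns_py_spec : Claim_equal_detect_suspicious_patterns_py := by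
  intro strings _
  show detect_suspicious_patterns_py strings = detect_suspicious_patterns_py_alt strings
  unfold detect_suspicious_patterns_py detect_suspicious_patterns_py_alt
  rw [pvFold_eq, pvCollect_eq strings [] (by simp)]
  rw [PySem.List.slice_to _ (by norm_num : (0:Int) ≤ 20)]
  have h20 : ((20:Int)).toNat = 20 := rfl
  simp only [List.nil_append, List.length_nil, Nat.sub_zero, h20]
  congr 1
  exact List.filter_congr (fun s _ => pv_test_eq s)
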